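-- pv_equiv track=rewrite | github.com/artofscripting/tile-farming-game | fertilizer_info_window.py | calculate_column_positions
-- ===== SOURCE A (Python) =====
-- def calculate_column_positions(col_widths):
--     """Calculate x positions for column centers based on widths"""
--     positions = []
--     current_x = 20  # Left margin
--
--     for width in col_widths:
--         center_x = current_x + width // 2
--         positions.append(center_x)
--         current_x += width
--
--     return positions
-- ===== SOURCE B (Python) =====
-- def calculate_column_positions(col_widths):
--     """Calculate x positions for column centers based on widths"""
--     edges = [20]
--     for w in col_widths:
--         edges.append(edges[-1] + w)
--     return [e + w // 2 for e, w in zip(edges, col_widths)]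
-- ===== Notes on version B (the rewrite author's own statement) =====
-- stated objective: alternative
-- what changed: B first builds the list of left edges as a prefix sum starting at 20, then produces the centers in a second pass by zipping edges with widths, instead of A's single loop interleaving the running offset with the center computation.
import Mathlib
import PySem

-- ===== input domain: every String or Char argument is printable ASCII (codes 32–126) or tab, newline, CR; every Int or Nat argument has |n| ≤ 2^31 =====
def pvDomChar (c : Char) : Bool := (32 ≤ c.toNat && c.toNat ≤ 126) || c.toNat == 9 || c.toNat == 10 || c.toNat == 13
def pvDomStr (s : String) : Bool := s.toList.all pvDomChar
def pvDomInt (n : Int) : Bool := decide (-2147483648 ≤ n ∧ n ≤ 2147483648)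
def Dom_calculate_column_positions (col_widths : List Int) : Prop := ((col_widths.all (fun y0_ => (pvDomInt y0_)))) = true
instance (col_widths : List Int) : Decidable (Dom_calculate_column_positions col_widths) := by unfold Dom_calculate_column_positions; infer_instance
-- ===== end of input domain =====

-- B separates the prefix-sum of left edges from the center computation (two passes) instead of A's single interleaved loop; same cost, alternative decomposition.

-- ===== PORT A =====
-- A: one loop carrying (positions, current_x), appending current_x + width // 2 and advancing current_x.
def calculate_column_positions (col_widths : List Int) : List Int :=
  (col_widths.foldl
    (fun (st : List Int × Int) width =>
      (st.1 ++ [st.2 + PySem.Int.floordiv width 2], st.2 + width))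
    ([], 20)).1

-- ===== PORT B =====
-- B's edge-building loop: edges = [20]; for w: edges.append(edges[-1] + w)
def pvEdges : Int → List Int → List Int
  | acc, [] => [acc]
  | acc, w :: ws => acc :: pvEdges (acc + w) ws

def calculate_column_positions_alt (col_widths : List Int) : List Int :=
  (List.zip (pvEdges 20 col_widths) col_widths).map
    (fun p => p.1 + PySem.Int.floordiv p.2 2)

-- ===== PRECONDITION & SPEC =====
def Spec_calculate_column_positions (col_widths : List Int) (out : List Int) : Prop := out = calculate_column_positions_alt col_widths
instance (col_widths : List Int) (out : List Int) : Decidable (Spec_calculate_column_positions col_widths out) := by unfold Spec_calculate_column_positions; infer_instance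

-- ===== CLAIM (what is proved, stated in full; the proofs are below) =====
def Claim_equal_calculate_column_positions : Prop := ∀ (col_widths : List Int), Dom_calculate_column_positions col_widths → Spec_calculate_column_positions col_widths (calculate_column_positions col_widths)

-- ===== LEMMAS AND PROOFS =====
theorem pvFold_eq (ws : List Int) : ∀ (pre : List Int) (acc : Int),
    (ws.foldl
      (fun (st : List Int × Int) width =>
        (st.1 ++ [st.2 + PySem.Int.floordiv width 2], st.2 + width))
      (pre, acc)).1
    = pre ++ (List.zip (pvEdges acc ws) ws).map (fun p => p.1 + PySem.Int.floordiv p.2 2) := by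
  induction ws with
  | nil => intro pre acc; simp [pvEdges]
  | cons w ws ih =>
      intro pre acc
      simp only [List.foldl_cons]
      rw [ih]
      simp [pvEdges]

-- ===== VERDICT (by name: the statement is the Claim_ definition above) =====
theorem calculate_column_positions_spec : Claim_equal_calculate_column_positions := by
  intro ws _
  unfold Spec_calculate_column_positions calculate_column_positions calculate_column_positions_alt
  simpa using pvFold_eq ws [] 20
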